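-- pv_equiv track=rewrite | github.com/prochihua/shioaji_split | my_utils/margin_fetcher.py | _map_code_to_product
-- ===== SOURCE A (Python) =====
-- def _map_code_to_product(code):
--     """
--     將實際合約代碼對應到期交所的商品名稱
--
--     對照表（根據期交所官網）:
--     - 臺股期貨 (TX)
--     - 小型臺指期貨 (MTX/MXF)
--     - 微型臺指期貨 (TMF)
--     - 臺指選擇權 (TXO)
--     - 電子期貨 (TE)
--     - 小型電子期貨 (ZEF)
--     - 金融期貨 (TF)
--     - 小型金融期貨 (ZFF)
--     """
--     mapping = {
--         'TX': '臺股期貨',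
--         'TXF': '臺股期貨',
--         'MTX': '小型臺指期貨',
--         'MXF': '小型臺指期貨',
--         'TMF': '微型臺指期貨',
--         'TXO': '臺指選擇權',
--         'TE': '電子期貨',
--         'ZEF': '小型電子期貨',
--         'TF': '金融期貨',
--         'ZFF': '小型金融期貨',
--     }
--
--     # 檢查代碼前綴
--     for prefix in sorted(mapping.keys(), key=len, reverse=True):
--         if code.startswith(prefix):
--             return mapping[prefix]
--
--     return code
-- ===== SOURCE B (Python) =====
-- def _map_code_to_product(code):
--     # decision tree grouped by leading characters: no mapping table, no key scan
--     if code.startswith('TX'):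
--         return '臺指選擇權' if code.startswith('TXO') else '臺股期貨'
--     if code.startswith('T'):
--         if code.startswith('TMF'):
--             return '微型臺指期貨'
--         if code.startswith('TE'):
--             return '電子期貨'
--         if code.startswith('TF'):
--             return '金融期貨'
--         return code
--     if code.startswith('MTX') or code.startswith('MXF'):
--         return '小型臺指期貨'
--     if code.startswith('ZEF'):
--         return '小型電子期貨'
--     if code.startswith('ZFF'):
--         return '小型金融期貨'
--     return code
-- ===== Notes on version B (the rewrite author's own statement) =====
-- stated objective: alternative
-- what changed: B drops the mapping dict and the length-sorted key scan entirely and decides the product by a hand-grouped prefix decision tree (branch on 'TX'/'T'/'M'/'Z' leading characters), preserving longest-prefix-first matching.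
import Mathlib
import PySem

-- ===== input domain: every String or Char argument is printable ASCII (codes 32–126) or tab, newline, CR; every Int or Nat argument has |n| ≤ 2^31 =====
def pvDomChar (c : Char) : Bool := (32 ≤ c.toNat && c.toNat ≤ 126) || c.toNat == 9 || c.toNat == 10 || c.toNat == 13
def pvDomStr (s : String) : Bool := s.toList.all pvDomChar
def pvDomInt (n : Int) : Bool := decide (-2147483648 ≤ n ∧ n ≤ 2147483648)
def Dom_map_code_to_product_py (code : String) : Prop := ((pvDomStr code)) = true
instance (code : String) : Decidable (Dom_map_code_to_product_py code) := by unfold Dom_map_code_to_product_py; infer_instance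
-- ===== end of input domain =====

-- B replaces A's mapping dict + length-sorted startswith scan by a hand-grouped prefix decision tree (alternative decomposition, same result).

-- ===== PORT A =====
-- the literal mapping dict of A
def pvMappingA : PySem.Dict String String :=
  PySem.Dict.ofList [("TX","臺股期貨"),("TXF","臺股期貨"),("MTX","小型臺指期貨"),("MXF","小型臺指期貨"),
    ("TMF","微型臺指期貨"),("TXO","臺指選擇權"),("TE","電子期貨"),("ZEF","小型電子期貨"),
    ("TF","金融期貨"),("ZFF","小型金融期貨")]

-- the 'for prefix in sorted(...): if code.startswith(prefix): return mapping[prefix]' loop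
def pvScanA (code : String) : List String → String
  | [] => code
  | p :: rest => if PySem.Str.startswith code p then (pvMappingA.get? p).getD code else pvScanA code rest

def map_code_to_product_py (code : String) : String :=
  pvScanA code (PySem.List.sorted pvMappingA.keys (fun k => PySem.Str.len k) true)

-- ===== PORT B =====
-- B's decision tree, branch for branch
def map_code_to_product_py_alt (code : String) : String :=
  if PySem.Str.startswith code "TX" then
    if PySem.Str.startswith code "TXO" then "臺指選擇權" else "臺股期貨"
  else if PySem.Str.startswith code "T" then
    if PySem.Str.startswith code "TMF" then "微型臺指期貨"
    else if PySem.Str.startswith code "TE" then "電子期貨"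
    else if PySem.Str.startswith code "TF" then "金融期貨"
    else code
  else if PySem.Str.startswith code "MTX" || PySem.Str.startswith code "MXF" then "小型臺指期貨"
  else if PySem.Str.startswith code "ZEF" then "小型電子期貨"
  else if PySem.Str.startswith code "ZFF" then "小型金融期貨"
  else code

-- ===== PRECONDITION & SPEC =====
def Spec_map_code_to_product_py (code : String) (out : String) : Prop := out = map_code_to_product_py_alt code
instance (code : String) (out : String) : Decidable (Spec_map_code_to_product_py code out) := by unfold Spec_map_code_to_product_py; infer_instance

-- ===== CLAIM (what is proved, stated in full; the proofs are below) =====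
def Claim_equal_map_code_to_product_py : Prop := ∀ (code : String), Dom_map_code_to_product_py code → Spec_map_code_to_product_py code (map_code_to_product_py code)

-- ===== LEMMAS AND PROOFS =====

-- Python's sorted(mapping.keys(), key=len, reverse=True): stable, 3-char keys first in insertion order
lemma pvSortedKeys : PySem.List.sorted pvMappingA.keys (fun k => PySem.Str.len k) true
    = ["TXF","MTX","MXF","TMF","TXO","ZEF","ZFF","TX","TE","TF"] := by decide

set_option maxHeartbeats 2000000 in
theorem map_code_to_product_py_spec : Claim_equal_map_code_to_product_py := by
  intro code _
  unfold Spec_map_code_to_product_py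
  rw [map_code_to_product_py, pvSortedKeys, map_code_to_product_py_alt]
  simp only [pvScanA,
    show pvMappingA.get? "TXF" = some "臺股期貨" from by decide,
    show pvMappingA.get? "MTX" = some "小型臺指期貨" from by decide,
    show pvMappingA.get? "MXF" = some "小型臺指期貨" from by decide,
    show pvMappingA.get? "TMF" = some "微型臺指期貨" from by decide,
    show pvMappingA.get? "TXO" = some "臺指選擇權" from by decide,
    show pvMappingA.get? "ZEF" = some "小型電子期貨" from by decide,
    show pvMappingA.get? "ZFF" = some "小型金融期貨" from by decide,
    show pvMappingA.get? "TX" = some "臺股期貨" from by decide,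
    show pvMappingA.get? "TE" = some "電子期貨" from by decide,
    show pvMappingA.get? "TF" = some "金融期貨" from by decide,
    Option.getD_some]
  simp only [PySem.Str.startswith_eq, PySem.Chars.startswith_iff, Bool.or_eq_true,
    show ("TX":String).toList = ['T','X'] from rfl, show ("T":String).toList = ['T'] from rfl,
    show ("TXF":String).toList = ['T','X','F'] from rfl, show ("MTX":String).toList = ['M','T','X'] from rfl,
    show ("MXF":String).toList = ['M','X','F'] from rfl, show ("TMF":String).toList = ['T','M','F'] from rfl,
    show ("TXO":String).toList = ['T','X','O'] from rfl, show ("TE":String).toList = ['T','E'] from rfl,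
    show ("ZEF":String).toList = ['Z','E','F'] from rfl, show ("TF":String).toList = ['T','F'] from rfl,
    show ("ZFF":String).toList = ['Z','F','F'] from rfl]
  generalize code.toList = cs
  rcases cs with _ | ⟨a, cs⟩
  · simp
  rcases cs with _ | ⟨b, cs⟩
  · by_cases hT : 'T' = a
    · subst hT; simp [List.cons_prefix_cons]
    · simp [List.cons_prefix_cons, hT]
  rcases cs with _ | ⟨c, t⟩
  · by_cases hT : 'T' = a
    · subst hT
      by_cases hX : 'X' = b
      · subst hX; simp [List.cons_prefix_cons]
      · by_cases hE : 'E' = b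
        · subst hE; simp [List.cons_prefix_cons]
        · by_cases hF : 'F' = b
          · subst hF; simp [List.cons_prefix_cons]
          · simp [List.cons_prefix_cons, hX, hE, hF]
    · simp [List.cons_prefix_cons, hT]
  · by_cases hT : 'T' = a
    · subst hT
      by_cases hX : 'X' = b
      · subst hX
        by_cases hF : 'F' = c
        · subst hF; simp [List.cons_prefix_cons]
        · by_cases hO : 'O' = c
          · subst hO; simp [List.cons_prefix_cons]
          · simp [List.cons_prefix_cons, hF, hO]
      · by_cases hM : 'M' = b
        · subst hM
          by_cases hF : 'F' = c
          · subst hF; simp [List.cons_prefix_cons]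
          · simp [List.cons_prefix_cons, hX, hF]
        · by_cases hE : 'E' = b
          · subst hE; simp [List.cons_prefix_cons, hX]
          · by_cases hF : 'F' = b
            · subst hF; simp [List.cons_prefix_cons, hX]
            · simp [List.cons_prefix_cons, hX, hM, hE, hF]
    · by_cases hMa : 'M' = a
      · subst hMa
        by_cases hTb : 'T' = b
        · subst hTb
          by_cases hXc : 'X' = c
          · subst hXc; simp [List.cons_prefix_cons]
          · simp [List.cons_prefix_cons, hXc]
        · by_cases hXb : 'X' = b
          · subst hXb
            by_cases hFc : 'F' = c
            · subst hFc; simp [List.cons_prefix_cons]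
            · simp [List.cons_prefix_cons, hFc]
          · simp [List.cons_prefix_cons, hTb, hXb]
      · by_cases hZ : 'Z' = a
        · subst hZ
          by_cases hEb : 'E' = b
          · subst hEb
            by_cases hFc : 'F' = c
            · subst hFc; simp [List.cons_prefix_cons]
            · simp [List.cons_prefix_cons, hFc]
          · by_cases hFb : 'F' = b
            · subst hFb
              by_cases hFc : 'F' = c
              · subst hFc; simp [List.cons_prefix_cons]
              · simp [List.cons_prefix_cons, hFc]
            · simp [List.cons_prefix_cons, hEb, hFb]
        · simp [List.cons_prefix_cons, hT, hMa, hZ]
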